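-- pv_equiv track=rewrite | github.com/jiajunma/unipotentrepn | standalone.py | _ils_firstcol_sign
-- ===== SOURCE A (Python) =====
-- def _ils_firstcol_sign(irr_s):
--     """Compute first-column signature of an ILS.
--     Reference: [BMSZ] Section 9.3, LS._sign_ILS_firstcol in LS.py."""
--     p, n = 0, 0
--     for i, (pp, nn) in enumerate(irr_s):
--         if i % 2 == 0:
--             p += abs(pp)
--             n += abs(nn)
--         else:
--             p += abs(nn)
--             n += abs(pp)
--     return (p, n)
-- ===== SOURCE B (Python) =====
-- def _ils_firstcol_sign(irr_s):
--     """Compute first-column signature of an ILS.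
--     Back-to-front pass with a role-swapping accumulator: prepending an
--     element shifts all later indices' parity, i.e. swaps the two running
--     totals, then the new head contributes (|pp|, |nn|) directly.
--     No index, no parity test needed."""
--     p, n = 0, 0
--     for pp, nn in reversed(list(irr_s)):
--         p, n = abs(pp) + n, abs(nn) + p
--     return (p, n)
-- ===== Notes on version B (the rewrite author's own statement) =====
-- stated objective: alternative
-- what changed: Replaces the forward enumerate-loop with a parity branch by a reversed single pass whose accumulator swaps roles at every step (p, n = abs(pp)+n, abs(nn)+p), eliminating the index and the parity test entirely.
import Mathlib
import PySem

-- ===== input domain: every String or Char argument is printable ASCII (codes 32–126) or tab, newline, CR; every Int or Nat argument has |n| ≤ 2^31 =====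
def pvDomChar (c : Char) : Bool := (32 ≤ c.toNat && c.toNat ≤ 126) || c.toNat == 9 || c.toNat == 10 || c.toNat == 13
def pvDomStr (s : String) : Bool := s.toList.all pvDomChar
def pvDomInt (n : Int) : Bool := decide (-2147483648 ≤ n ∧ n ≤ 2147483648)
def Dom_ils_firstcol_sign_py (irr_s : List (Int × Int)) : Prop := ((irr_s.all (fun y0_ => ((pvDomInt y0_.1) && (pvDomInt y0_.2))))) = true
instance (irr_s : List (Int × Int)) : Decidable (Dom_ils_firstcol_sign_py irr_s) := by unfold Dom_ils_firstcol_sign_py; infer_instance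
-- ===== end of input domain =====

-- ===== PORT A =====
-- B replaces the forward indexed loop + parity branch by a reversed pass with a role-swapping accumulator (objective: alternative).
def ils_firstcol_sign_py (irr_s : List (Int × Int)) : Int × Int :=
  (PySem.List.enumerate irr_s).foldl
    (fun pn ix =>
      if ix.1 % 2 == 0 then (pn.1 + |ix.2.1|, pn.2 + |ix.2.2|)
      else (pn.1 + |ix.2.2|, pn.2 + |ix.2.1|))
    (0, 0)

-- ===== PORT B =====
-- for pp, nn in reversed(list(irr_s)): p, n = abs(pp) + n, abs(nn) + p
def ils_firstcol_sign_py_alt (irr_s : List (Int × Int)) : Int × Int :=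
  irr_s.reverse.foldl (fun pn x => (|x.1| + pn.2, |x.2| + pn.1)) (0, 0)

-- ===== PRECONDITION & SPEC =====
def Spec_ils_firstcol_sign_py (irr_s : List (Int × Int)) (out : Int × Int) : Prop := out = ils_firstcol_sign_py_alt irr_s
instance (irr_s : List (Int × Int)) (out : Int × Int) : Decidable (Spec_ils_firstcol_sign_py irr_s out) := by unfold Spec_ils_firstcol_sign_py; infer_instance

-- ===== CLAIM (what is proved, stated in full; the proofs are below) =====
def Claim_equal_ils_firstcol_sign_py : Prop := ∀ (irr_s : List (Int × Int)), Dom_ils_firstcol_sign_py irr_s → Spec_ils_firstcol_sign_py irr_s (ils_firstcol_sign_py irr_s)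

-- ===== LEMMAS AND PROOFS =====
-- induction skeleton: two list elements at a time
def pvTwoStep {α : Type} : List α → Unit
  | [] => ()
  | [_] => ()
  | _ :: _ :: rest => pvTwoStep rest

-- A's enumerate-fold from an even start index equals B's right fold, shifted by the accumulator.
theorem pv_fold_eq (xs : List (Int × Int)) : ∀ (k : Nat) (p n : Int),
    (PySem.List.enumerate xs (2 * (k : Int))).foldl
      (fun pn ix =>
        if ix.1 % 2 == 0 then (pn.1 + |ix.2.1|, pn.2 + |ix.2.2|)
        else (pn.1 + |ix.2.2|, pn.2 + |ix.2.1|))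
      (p, n)
    = (p + (xs.foldr (fun x pn => (|x.1| + pn.2, |x.2| + pn.1)) (0, 0)).1,
       n + (xs.foldr (fun x pn => (|x.1| + pn.2, |x.2| + pn.1)) (0, 0)).2) := by
  induction xs using pvTwoStep.induct with
  | case1 =>
    intro k p n
    simp [PySem.List.enumerate_nil]
  | case2 x =>
    intro k p n
    have he : ((2 * (k : Int)) % 2 == 0) = true := by
      simp [Int.mul_emod_right]
    simp [PySem.List.enumerate_cons, PySem.List.enumerate_nil]
  | case3 x y rest ih =>
    intro k p n
    have he : ((2 * (k : Int)) % 2 == 0) = true := by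
      simp [Int.mul_emod_right]
    have ho : ((2 * (k : Int) + 1) % 2 == 0) = false := by
      simp
    have hstep : (2 : Int) * (k : Int) + 1 + 1 = 2 * ((k + 1 : Nat) : Int) := by
      push_cast; ring
    simp only [PySem.List.enumerate_cons, List.foldl_cons, he, ho, Bool.false_eq_true,
      if_false, if_true, hstep]
    rw [ih (k + 1)]
    simp only [List.foldr_cons]
    simp only [Prod.mk.injEq]
    constructor <;> ring

-- ===== VERDICT (by name: the statement is the Claim_ definition above) =====
theorem ils_firstcol_sign_py_spec : Claim_equal_ils_firstcol_sign_py := by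
  intro irr_s _
  unfold Spec_ils_firstcol_sign_py ils_firstcol_sign_py ils_firstcol_sign_py_alt
  rw [List.foldl_reverse]
  have h := pv_fold_eq irr_s 0 0 0
  simpa using h
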